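-- pv_equiv track=rewrite | github.com/worldwidelaw/legal-sources | sources/US/JuriscraperUpdater/bootstrap.py | _get_state_code
-- ===== SOURCE A (Python) =====
-- MODULE_PREFIX_TO_STATE = {
--     "ala": "US-AL", "alaska": "US-AK", "ariz": "US-AZ", "ark": "US-AR",
--     "cal": "US-CA", "colo": "US-CO", "conn": "US-CT", "dc": "US-DC",
--     "delaware": "US-DE", "fla": "US-FL", "ga": "US-GA", "haw": "US-HI",
--     "idaho": "US-ID", "ill": "US-IL", "ind": "US-IN", "iowa": "US-IA",
--     "kan": "US-KS", "ky": "US-KY", "la": "US-LA", "me": "US-ME",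
--     "md": "US-MD", "mass": "US-MA", "mich": "US-MI", "minn": "US-MN",
--     "miss": "US-MS", "mo": "US-MO", "mont": "US-MT", "neb": "US-NE",
--     "nev": "US-NV", "nh": "US-NH", "nj": "US-NJ", "nm": "US-NM",
--     "ny": "US-NY", "nc": "US-NC", "nd": "US-ND", "ohio": "US-OH",
--     "okla": "US-OK", "or": "US-OR", "ore": "US-OR", "pa": "US-PA",
--     "ri": "US-RI", "sc": "US-SC", "sd": "US-SD", "tenn": "US-TN",
--     "tex": "US-TX", "utah": "US-UT", "vt": "US-VT", "va": "US-VA",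
--     "wash": "US-WA", "wva": "US-WV", "wis": "US-WI", "wyo": "US-WY",
--     # Federal
--     "ca1": "US", "ca2": "US", "ca3": "US", "ca4": "US", "ca5": "US",
--     "ca6": "US", "ca7": "US", "ca8": "US", "ca9": "US", "ca10": "US",
--     "ca11": "US", "cadc": "US", "cafc": "US", "scotus": "US",
-- }
--
-- def _get_state_code(module_name: str) -> str:
--     """Extract state code from a Juriscraper module path."""
--     short = module_name.split(".")[-1]
--     # Try exact match first
--     if short in MODULE_PREFIX_TO_STATE:
--         return MODULE_PREFIX_TO_STATE[short]
--     # Try prefix matching (e.g. "calctapp_1st" → "cal" → "US-CA")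
--     for prefix, code in sorted(MODULE_PREFIX_TO_STATE.items(),
--                                 key=lambda x: -len(x[0])):
--         if short.startswith(prefix):
--             return code
--     return "US"
-- ===== SOURCE B (Python) =====
-- MODULE_PREFIX_TO_STATE = {
--     "ala": "US-AL", "alaska": "US-AK", "ariz": "US-AZ", "ark": "US-AR",
--     "cal": "US-CA", "colo": "US-CO", "conn": "US-CT", "dc": "US-DC",
--     "delaware": "US-DE", "fla": "US-FL", "ga": "US-GA", "haw": "US-HI",
--     "idaho": "US-ID", "ill": "US-IL", "ind": "US-IN", "iowa": "US-IA",
--     "kan": "US-KS", "ky": "US-KY", "la": "US-LA", "me": "US-ME",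
--     "md": "US-MD", "mass": "US-MA", "mich": "US-MI", "minn": "US-MN",
--     "miss": "US-MS", "mo": "US-MO", "mont": "US-MT", "neb": "US-NE",
--     "nev": "US-NV", "nh": "US-NH", "nj": "US-NJ", "nm": "US-NM",
--     "ny": "US-NY", "nc": "US-NC", "nd": "US-ND", "ohio": "US-OH",
--     "okla": "US-OK", "or": "US-OR", "ore": "US-OR", "pa": "US-PA",
--     "ri": "US-RI", "sc": "US-SC", "sd": "US-SD", "tenn": "US-TN",
--     "tex": "US-TX", "utah": "US-UT", "vt": "US-VT", "va": "US-VA",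
--     "wash": "US-WA", "wva": "US-WV", "wis": "US-WI", "wyo": "US-WY",
--     # Federal
--     "ca1": "US", "ca2": "US", "ca3": "US", "ca4": "US", "ca5": "US",
--     "ca6": "US", "ca7": "US", "ca8": "US", "ca9": "US", "ca10": "US",
--     "ca11": "US", "cadc": "US", "cafc": "US", "scotus": "US",
-- }
--
--
-- _MAX_PREFIX_LEN = max(map(len, MODULE_PREFIX_TO_STATE))
--
--
-- def _get_state_code(module_name: str) -> str:
--     """Extract state code from a Juriscraper module path."""
--     short = module_name.split(".")[-1]
--     # Walk the PREFIXES OF THE INPUT from longest to shortest (no prefix longer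
--     # than the longest key can match) and look each one up in the table: the
--     # first (= longest) prefix that is a key wins.  An exact match is just the
--     # full-length prefix, so no separate branch and no scan of the table are
--     # needed.
--     for i in range(min(len(short), _MAX_PREFIX_LEN), 0, -1):
--         code = MODULE_PREFIX_TO_STATE.get(short[:i])
--         if code is not None:
--             return code
--     return "US"
-- ===== Notes on version B (the rewrite author's own statement) =====
-- stated objective: simpler
-- what changed: Instead of A's exact-match dict shortcut plus a scan of the table items sorted by descending key length, B walks the prefixes of the module suffix from longest (capped at the longest key length) to shortest and returns the first one found in the dict, so the table is never iterated or sorted.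
import Mathlib
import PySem

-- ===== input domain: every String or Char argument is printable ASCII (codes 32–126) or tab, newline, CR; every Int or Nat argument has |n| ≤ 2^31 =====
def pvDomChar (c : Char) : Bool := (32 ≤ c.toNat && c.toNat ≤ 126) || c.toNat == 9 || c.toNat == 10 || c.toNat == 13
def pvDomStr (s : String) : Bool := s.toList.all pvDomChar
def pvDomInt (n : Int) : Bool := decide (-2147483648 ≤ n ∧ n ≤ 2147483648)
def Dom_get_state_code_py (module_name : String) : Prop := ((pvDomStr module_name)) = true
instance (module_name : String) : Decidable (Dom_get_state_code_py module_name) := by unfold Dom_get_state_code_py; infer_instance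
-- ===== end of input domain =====

-- B replaces A's exact-match shortcut plus scan of the length-sorted table items by a
-- descent over the prefixes of the module suffix, longest first, returning the first
-- prefix that is a key of the table (objective: simpler — the table is never iterated).

-- ===== PORT A =====
-- the module-level dict literal MODULE_PREFIX_TO_STATE (distinct keys, insertion order)
def pvTable : List (String × String) :=
  [("ala", "US-AL"), ("alaska", "US-AK"), ("ariz", "US-AZ"), ("ark", "US-AR"),
   ("cal", "US-CA"), ("colo", "US-CO"), ("conn", "US-CT"), ("dc", "US-DC"),
   ("delaware", "US-DE"), ("fla", "US-FL"), ("ga", "US-GA"), ("haw", "US-HI"),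
   ("idaho", "US-ID"), ("ill", "US-IL"), ("ind", "US-IN"), ("iowa", "US-IA"),
   ("kan", "US-KS"), ("ky", "US-KY"), ("la", "US-LA"), ("me", "US-ME"),
   ("md", "US-MD"), ("mass", "US-MA"), ("mich", "US-MI"), ("minn", "US-MN"),
   ("miss", "US-MS"), ("mo", "US-MO"), ("mont", "US-MT"), ("neb", "US-NE"),
   ("nev", "US-NV"), ("nh", "US-NH"), ("nj", "US-NJ"), ("nm", "US-NM"),
   ("ny", "US-NY"), ("nc", "US-NC"), ("nd", "US-ND"), ("ohio", "US-OH"),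
   ("okla", "US-OK"), ("or", "US-OR"), ("ore", "US-OR"), ("pa", "US-PA"),
   ("ri", "US-RI"), ("sc", "US-SC"), ("sd", "US-SD"), ("tenn", "US-TN"),
   ("tex", "US-TX"), ("utah", "US-UT"), ("vt", "US-VT"), ("va", "US-VA"),
   ("wash", "US-WA"), ("wva", "US-WV"), ("wis", "US-WI"), ("wyo", "US-WY"),
   ("ca1", "US"), ("ca2", "US"), ("ca3", "US"), ("ca4", "US"), ("ca5", "US"),
   ("ca6", "US"), ("ca7", "US"), ("ca8", "US"), ("ca9", "US"), ("ca10", "US"),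
   ("ca11", "US"), ("cadc", "US"), ("cafc", "US"), ("scotus", "US")]

-- A's for-loop over the length-sorted items: the first key `short` starts with wins
def pvScanA (short : String) : List (String × String) → String
  | [] => "US"
  | kv :: rest => if PySem.Str.startswith short kv.1 then kv.2 else pvScanA short rest

def get_state_code_py (module_name : String) : String :=
  -- short = module_name.split(".")[-1]  (split by "." never raises, list is nonempty)
  let short := PySem.List.pyGetD ((PySem.Str.split? module_name ".").getD []) (-1) ""
  -- exact-match shortcut: `if short in MODULE_PREFIX_TO_STATE: return ...[short]`
  match (PySem.Dict.ofList pvTable).get? short with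
  | some code => code
  | none =>
      pvScanA short
        (PySem.List.sorted (PySem.Dict.ofList pvTable).items
          (fun x => -(PySem.Str.len x.1)) false)

-- ===== PORT B =====
-- B's `MODULE_PREFIX_TO_STATE.get(q)`: a by-hand port of the dict lookup as a direct
-- match on the (distinct) key literals — exact, since a Python dict literal with
-- distinct keys maps each key to its value and everything else to None.
def pvGetB (q : String) : Option String :=
  match q with
  | "ala" => some "US-AL" | "alaska" => some "US-AK" | "ariz" => some "US-AZ"
  | "ark" => some "US-AR" | "cal" => some "US-CA" | "colo" => some "US-CO"
  | "conn" => some "US-CT" | "dc" => some "US-DC" | "delaware" => some "US-DE"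
  | "fla" => some "US-FL" | "ga" => some "US-GA" | "haw" => some "US-HI"
  | "idaho" => some "US-ID" | "ill" => some "US-IL" | "ind" => some "US-IN"
  | "iowa" => some "US-IA" | "kan" => some "US-KS" | "ky" => some "US-KY"
  | "la" => some "US-LA" | "me" => some "US-ME" | "md" => some "US-MD"
  | "mass" => some "US-MA" | "mich" => some "US-MI" | "minn" => some "US-MN"
  | "miss" => some "US-MS" | "mo" => some "US-MO" | "mont" => some "US-MT"
  | "neb" => some "US-NE" | "nev" => some "US-NV" | "nh" => some "US-NH"
  | "nj" => some "US-NJ" | "nm" => some "US-NM" | "ny" => some "US-NY"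
  | "nc" => some "US-NC" | "nd" => some "US-ND" | "ohio" => some "US-OH"
  | "okla" => some "US-OK" | "or" => some "US-OR" | "ore" => some "US-OR"
  | "pa" => some "US-PA" | "ri" => some "US-RI" | "sc" => some "US-SC"
  | "sd" => some "US-SD" | "tenn" => some "US-TN" | "tex" => some "US-TX"
  | "utah" => some "US-UT" | "vt" => some "US-VT" | "va" => some "US-VA"
  | "wash" => some "US-WA" | "wva" => some "US-WV" | "wis" => some "US-WI"
  | "wyo" => some "US-WY" | "ca1" => some "US" | "ca2" => some "US"
  | "ca3" => some "US" | "ca4" => some "US" | "ca5" => some "US"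
  | "ca6" => some "US" | "ca7" => some "US" | "ca8" => some "US"
  | "ca9" => some "US" | "ca10" => some "US" | "ca11" => some "US"
  | "cadc" => some "US" | "cafc" => some "US" | "scotus" => some "US"
  | _ => none

-- the module-level `_MAX_PREFIX_LEN = max(map(len, MODULE_PREFIX_TO_STATE))`,
-- evaluated once at import time: the longest key is "delaware", of length 8
def pvMaxPrefixLenB : Nat := 8

-- B's `for i in range(min(len(short), _MAX_PREFIX_LEN), 0, -1): …` — descend over the prefix lengths;
-- `short[:i]` with 0 < i ≤ len(short) is exactly the first i characters.
def pvDescendB (short : String) : Nat → String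
  | 0 => "US"
  | i + 1 =>
      match pvGetB (String.ofList (short.toList.take (i + 1))) with
      | some code => code
      | none => pvDescendB short i

def get_state_code_py_alt (module_name : String) : String :=
  let short := PySem.List.pyGetD ((PySem.Str.split? module_name ".").getD []) (-1) ""
  pvDescendB short (min short.toList.length pvMaxPrefixLenB)

-- ===== PRECONDITION & SPEC =====
def Spec_get_state_code_py (module_name : String) (out : String) : Prop := out = get_state_code_py_alt module_name
instance (module_name : String) (out : String) : Decidable (Spec_get_state_code_py module_name out) := by unfold Spec_get_state_code_py; infer_instance

-- ===== CLAIM (what is proved, stated in full; the proofs are below) =====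
def Claim_equal_get_state_code_py : Prop := ∀ (module_name : String), Dom_get_state_code_py module_name → Spec_get_state_code_py module_name (get_state_code_py module_name)

-- ===== LEMMAS AND PROOFS =====

-- `short` starts with `p`
def pvM (short p : String) : Prop := PySem.Str.startswith short p = true

-- r is the code of a matching key of maximal length in l ("US" if none matches)
def pvGood (short : String) (l : List (String × String)) (r : String) : Prop :=
  ((∀ kv ∈ l, ¬ pvM short kv.1) ∧ r = "US") ∨
  (∃ kv ∈ l, pvM short kv.1 ∧ r = kv.2 ∧
    ∀ kv' ∈ l, pvM short kv'.1 → PySem.Str.len kv'.1 ≤ PySem.Str.len kv.1)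

theorem pvM_prefix {short p : String} (h : pvM short p) : p.toList <+: short.toList := by
  unfold pvM at h
  rw [PySem.Str.startswith_eq] at h
  exact (PySem.Chars.startswith_iff _ _).mp h

theorem pvM_of_prefix {short p : String} (h : p.toList <+: short.toList) : pvM short p := by
  unfold pvM
  rw [PySem.Str.startswith_eq]
  exact (PySem.Chars.startswith_iff _ _).mpr h

theorem pvM_refl (s : String) : pvM s s := pvM_of_prefix (List.prefix_refl _)

theorem pvM_le_len {short p : String} (h : pvM short p) :
    PySem.Str.len p ≤ PySem.Str.len short := by
  rw [PySem.Str.len_eq, PySem.Str.len_eq]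
  exact_mod_cast (pvM_prefix h).length_le

-- two matching prefixes of the same string with equal length are the same string
theorem pvM_len_eq {short p q : String} (hp : pvM short p) (hq : pvM short q)
    (hlen : PySem.Str.len p = PySem.Str.len q) : p = q := by
  rw [PySem.Str.len_eq, PySem.Str.len_eq] at hlen
  have hl : p.toList.length = q.toList.length := by exact_mod_cast hlen
  rcases List.prefix_or_prefix_of_prefix (pvM_prefix hp) (pvM_prefix hq) with h | h
  · exact String.toList_inj.mp (h.eq_of_length hl)
  · exact (String.toList_inj.mp (h.eq_of_length hl.symm)).symm

-- in a list with Nodup first components, a key determines its value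
theorem pvVal_unique : ∀ (l : List (String × String)), (l.map Prod.fst).Nodup →
    ∀ (k v1 v2 : String), (k, v1) ∈ l → (k, v2) ∈ l → v1 = v2 := by
  intro l
  induction l with
  | nil => intro _ k v1 v2 h1 _; cases h1
  | cons hd tl ih =>
      intro hnd k v1 v2 h1 h2
      simp only [List.map_cons, List.nodup_cons] at hnd
      rcases List.mem_cons.mp h1 with h1 | h1 <;> rcases List.mem_cons.mp h2 with h2 | h2
      · exact congrArg Prod.snd (h1.trans h2.symm)
      · exfalso; apply hnd.1; rw [← h1]; show k ∈ tl.map Prod.fst; exact List.mem_map_of_mem h2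
      · exfalso; apply hnd.1; rw [← h2]; show k ∈ tl.map Prod.fst; exact List.mem_map_of_mem h1
      · exact ih hnd.2 k v1 v2 h1 h2

theorem pvGood_unique {short : String} {l : List (String × String)}
    (hnd : (l.map Prod.fst).Nodup) {r1 r2 : String}
    (h1 : pvGood short l r1) (h2 : pvGood short l r2) : r1 = r2 := by
  rcases h1 with ⟨hn1, hr1⟩ | ⟨kv1, hm1, hM1, hr1, hmax1⟩ <;>
    rcases h2 with ⟨hn2, hr2⟩ | ⟨kv2, hm2, hM2, hr2, hmax2⟩
  · rw [hr1, hr2]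
  · exact absurd hM2 (hn1 kv2 hm2)
  · exact absurd hM1 (hn2 kv1 hm1)
  · have hlen : PySem.Str.len kv1.1 = PySem.Str.len kv2.1 :=
      le_antisymm (hmax2 kv1 hm1 hM1) (hmax1 kv2 hm2 hM2)
    have hkey : kv1.1 = kv2.1 := pvM_len_eq hM1 hM2 hlen
    rw [hr1, hr2]
    exact pvVal_unique l hnd kv1.1 kv1.2 kv2.2 hm1 (by rw [hkey]; exact (Prod.mk.eta (p := kv2)) ▸ hm2)

theorem pvGood_perm {short r : String} {l l' : List (String × String)}
    (hp : l'.Perm l) (h : pvGood short l' r) : pvGood short l r := by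
  rcases h with ⟨hn, hr⟩ | ⟨kv, hm, hM, hr, hmax⟩
  · exact Or.inl ⟨fun kv hkv => hn kv (hp.mem_iff.mpr hkv), hr⟩
  · exact Or.inr ⟨kv, hp.mem_iff.mp hm, hM, hr,
      fun kv' hkv' => hmax kv' (hp.mem_iff.mpr hkv')⟩

-- A's scan of a length-descending list produces a maximal-length match
theorem pvScanA_good (short : String) : ∀ (l : List (String × String)),
    l.Pairwise (fun a b => PySem.Str.len b.1 ≤ PySem.Str.len a.1) →
    pvGood short l (pvScanA short l) := by
  intro l hpw
  induction l with
  | nil => exact Or.inl ⟨by simp, rfl⟩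
  | cons hd tl ih =>
      rw [List.pairwise_cons] at hpw
      by_cases h : PySem.Str.startswith short hd.1 = true
      · refine Or.inr ⟨hd, List.mem_cons_self, h, by rw [pvScanA, if_pos h], ?_⟩
        intro kv' hkv' _
        rcases List.mem_cons.mp hkv' with h' | h'
        · rw [h']
        · exact hpw.1 kv' h'
      · have hrec := ih hpw.2
        have hscan : pvScanA short (hd :: tl) = pvScanA short tl := by rw [pvScanA, if_neg h]
        rw [hscan]
        rcases hrec with ⟨hn, hr⟩ | ⟨kv, hm, hM, hr, hmax⟩
        · refine Or.inl ⟨?_, hr⟩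
          intro kv hkv
          rcases List.mem_cons.mp hkv with h' | h'
          · rw [h']; exact h
          · exact hn kv h'
        · refine Or.inr ⟨kv, List.mem_cons_of_mem _ hm, hM, hr, ?_⟩
          intro kv' hkv' hM'
          rcases List.mem_cons.mp hkv' with h' | h'
          · exact absurd (h' ▸ hM') h
          · exact hmax kv' h' hM'

set_option maxRecDepth 40000 in
theorem pvItems_eq : (PySem.Dict.ofList pvTable).items = pvTable := by decide

set_option maxRecDepth 40000 in
theorem pvKeys_nodup : (pvTable.map Prod.fst).Nodup := by decide

-- every key of the table is nonempty and no longer than pvMaxPrefixLenB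
set_option maxRecDepth 40000 in
theorem pvKeys_ne_nil : ∀ kv ∈ pvTable, kv.1.toList ≠ [] := by decide

set_option maxRecDepth 40000 in
theorem pvKeys_len_le : ∀ kv ∈ pvTable, kv.1.toList.length ≤ pvMaxPrefixLenB := by decide

-- B's lookup answers `some` exactly on the table entries
set_option maxRecDepth 40000 in
theorem pvGetB_of_mem : ∀ kv ∈ pvTable, pvGetB kv.1 = some kv.2 := by decide

set_option maxRecDepth 40000 in
theorem pvGetB_mem : ∀ (q c : String), pvGetB q = some c → (q, c) ∈ pvTable := by
  intro q c h
  unfold pvGetB at h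
  split at h <;> simp_all [pvTable]

theorem pvM_eq_take {short p : String} (h : pvM short p) :
    p.toList = short.toList.take p.toList.length :=
  List.prefix_iff_eq_take.mp (pvM_prefix h)

-- B's descent invariant: after considering the prefix lengths i, i-1, …, 1 the result
-- is "US" if no table key of length ≤ i matches, else the code of the longest such key
theorem pvDescendB_good (short : String) : ∀ (i : Nat), i ≤ short.toList.length →
    ((pvDescendB short i = "US" ∧
       ∀ kv ∈ pvTable, pvM short kv.1 → kv.1.toList.length ≤ i → False) ∨
     (∃ kv ∈ pvTable, pvM short kv.1 ∧ pvDescendB short i = kv.2 ∧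
       kv.1.toList.length ≤ i ∧
       ∀ kv' ∈ pvTable, pvM short kv'.1 → kv'.1.toList.length ≤ i →
         kv'.1.toList.length ≤ kv.1.toList.length)) := by
  intro i
  induction i with
  | zero =>
      intro _
      refine Or.inl ⟨rfl, ?_⟩
      intro kv hkv _ hlen
      exact pvKeys_ne_nil kv hkv (List.eq_nil_of_length_eq_zero (Nat.le_zero.mp hlen))
  | succ i ih =>
      intro hle
      have hi : i ≤ short.toList.length := Nat.le_of_succ_le hle
      cases hget : pvGetB (String.ofList (short.toList.take (i + 1))) with
      | some code =>
          have hmem : (String.ofList (short.toList.take (i + 1)), code) ∈ pvTable :=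
            pvGetB_mem _ _ hget
          have hlen : (String.ofList (short.toList.take (i + 1))).toList.length = i + 1 := by
            rw [String.toList_ofList, List.length_take]
            omega
          refine Or.inr ⟨(String.ofList (short.toList.take (i + 1)), code), hmem, ?_, ?_, ?_, ?_⟩
          · refine pvM_of_prefix ?_
            rw [String.toList_ofList]
            exact List.take_prefix (i + 1) short.toList
          · rw [pvDescendB, hget]
          · exact Nat.le_of_eq hlen
          · intro kv' _ _ h'
            exact le_of_le_of_eq h' hlen.symm
      | none =>
          have hstep : pvDescendB short (i + 1) = pvDescendB short i := by
            rw [pvDescendB, hget]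
          have hnone : ∀ kv ∈ pvTable, pvM short kv.1 → kv.1.toList.length ≠ i + 1 := by
            intro kv hkv hM heq
            have htake : kv.1.toList = short.toList.take (i + 1) := by
              rw [pvM_eq_take hM, heq]
            have hkey : kv.1 = String.ofList (short.toList.take (i + 1)) :=
              String.toList_inj.mp (by rw [String.toList_ofList]; exact htake)
            have := pvGetB_of_mem kv hkv
            rw [hkey, hget] at this
            cases this
          rcases ih hi with ⟨hr, hn⟩ | ⟨kv, hm, hM, hr, hlen, hmax⟩
          · refine Or.inl ⟨hstep.trans hr, ?_⟩
            intro kv hkv hM hlen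
            rcases Nat.lt_or_ge kv.1.toList.length (i + 1) with h' | h'
            · exact hn kv hkv hM (Nat.lt_succ_iff.mp h')
            · exact hnone kv hkv hM (Nat.le_antisymm hlen h')
          · refine Or.inr ⟨kv, hm, hM, hstep.trans hr, Nat.le_succ_of_le hlen, ?_⟩
            intro kv' hkv' hM' hlen'
            rcases Nat.lt_or_ge kv'.1.toList.length (i + 1) with h' | h'
            · exact hmax kv' hkv' hM' (Nat.lt_succ_iff.mp h')
            · exact absurd (Nat.le_antisymm hlen' h') (hnone kv' hkv' hM')

theorem pvDescendB_pvGood (short : String) :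
    pvGood short pvTable (pvDescendB short (min short.toList.length pvMaxPrefixLenB)) := by
  have hb : ∀ kv ∈ pvTable, pvM short kv.1 →
      kv.1.toList.length ≤ min short.toList.length pvMaxPrefixLenB := by
    intro kv hkv hM
    exact le_min (pvM_prefix hM).length_le (pvKeys_len_le kv hkv)
  rcases pvDescendB_good short (min short.toList.length pvMaxPrefixLenB)
      (Nat.min_le_left _ _) with ⟨hr, hn⟩ | ⟨kv, hm, hM, hr, _, hmax⟩
  · refine Or.inl ⟨?_, hr⟩
    intro kv hkv hM
    exact hn kv hkv hM (hb kv hkv hM)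
  · refine Or.inr ⟨kv, hm, hM, hr, ?_⟩
    intro kv' hkv' hM'
    have := hmax kv' hkv' hM' (hb kv' hkv' hM')
    rw [PySem.Str.len_eq, PySem.Str.len_eq]
    exact_mod_cast this

theorem pvExact_pvGood {short code : String}
    (h : (PySem.Dict.ofList pvTable).get? short = some code) :
    pvGood short pvTable code := by
  have hmem : (short, code) ∈ pvTable := by
    have := PySem.Dict.mem_items_of_get?_eq_some _ h
    rwa [pvItems_eq] at this
  exact Or.inr ⟨(short, code), hmem, pvM_refl short, rfl,
    fun kv' _ hM' => pvM_le_len hM'⟩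

theorem pvScanA_sorted_pvGood (short : String) :
    pvGood short pvTable
      (pvScanA short (PySem.List.sorted (PySem.Dict.ofList pvTable).items
        (fun x => -(PySem.Str.len x.1)) false)) := by
  have hpw : (PySem.List.sorted (PySem.Dict.ofList pvTable).items
      (fun x => -(PySem.Str.len x.1)) false).Pairwise
      (fun a b => PySem.Str.len b.1 ≤ PySem.Str.len a.1) :=
    (PySem.List.sorted_pairwise _ _).imp (fun h => by omega)
  have hperm : (PySem.List.sorted (PySem.Dict.ofList pvTable).items
      (fun x => -(PySem.Str.len x.1)) false).Perm pvTable :=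
    (PySem.List.sorted_perm _ _ _).trans (List.Perm.of_eq pvItems_eq)
  exact pvGood_perm hperm (pvScanA_good short _ hpw)

-- ===== VERDICT (by name: the statement is the Claim_ definition above) =====
theorem get_state_code_py_spec : Claim_equal_get_state_code_py := by
  intro m _
  unfold Spec_get_state_code_py get_state_code_py get_state_code_py_alt
  set short := PySem.List.pyGetD ((PySem.Str.split? m ".").getD []) (-1) "" with hs
  have hB : pvGood short pvTable
      (pvDescendB short (min short.toList.length pvMaxPrefixLenB)) :=
    pvDescendB_pvGood short
  cases h : (PySem.Dict.ofList pvTable).get? short with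
  | some code =>
      simp only [h]
      exact pvGood_unique pvKeys_nodup (pvExact_pvGood h) hB
  | none =>
      simp only [h]
      exact pvGood_unique pvKeys_nodup (pvScanA_sorted_pvGood short) hB
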